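-- pv_equiv track=rewrite | github.com/robert-ancell/jpegsuite | generate/huffman.py | get_huffman_code
-- ===== SOURCE A (Python) =====
-- def get_huffman_code(table, symbol):
--     code = 0
--     for i, symbols_by_length in enumerate(table):
--         length = i + 1
--         for s in symbols_by_length:
--             if s == symbol:
--                 bits = []
--                 for i in range(length):
--                     if code & (1 << (length - i - 1)) != 0:
--                         bits.append(1)
--                     else:
--                         bits.append(0)
--                 return bits
--             code += 1
--         code <<= 1
--     raise Exception("Missing symbol")
-- ===== SOURCE B (Python) =====
-- def get_huffman_code(table, symbol):
--     # locate the first occurrence: its length L and offset j within that level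
--     L = None
--     for i, row in enumerate(table):
--         if symbol in row:
--             L = i + 1
--             j = row.index(symbol)
--             break
--     if L is None:
--         raise Exception("Missing symbol")
--     # canonical first code for length L
--     first = 0
--     for row in table[:L - 1]:
--         first = (first + len(row)) << 1
--     code = first + j
--     # integer -> bit list, little-endian then reversed
--     bits = []
--     for _ in range(L):
--         bits.append(code & 1)
--         code >>= 1
--     return bits[::-1]
-- ===== Notes on version B (the rewrite author's own statement) =====
-- stated objective: alternative
-- what changed: B replaces A's single interleaved code counter with the canonical-Huffman decomposition: locate the symbol's length L and offset j, fold per-length counts into the first code for L, add j, and emit bits little-endian then reverse, instead of A's big-endian bit probe inside the scan.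
import Mathlib
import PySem

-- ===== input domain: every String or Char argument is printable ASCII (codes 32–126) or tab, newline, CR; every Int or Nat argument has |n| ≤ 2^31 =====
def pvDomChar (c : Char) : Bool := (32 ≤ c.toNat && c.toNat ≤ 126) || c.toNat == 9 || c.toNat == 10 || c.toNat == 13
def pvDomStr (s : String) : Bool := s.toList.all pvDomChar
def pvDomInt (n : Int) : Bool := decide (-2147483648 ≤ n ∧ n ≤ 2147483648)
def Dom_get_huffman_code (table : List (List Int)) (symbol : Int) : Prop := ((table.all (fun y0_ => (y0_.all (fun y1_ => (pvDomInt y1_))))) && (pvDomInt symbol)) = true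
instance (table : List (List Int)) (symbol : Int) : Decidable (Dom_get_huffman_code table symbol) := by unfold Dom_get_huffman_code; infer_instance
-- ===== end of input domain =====

-- B computes the code by the canonical-Huffman decomposition (length + offset + first-code fold,
-- bits emitted little-endian then reversed) instead of A's interleaved counter; alternative, same cost.


-- ===== PORT A =====
-- A's 'code' starts at 0 and only grows (+= 1, <<= 1), so it is a nonnegative Python int:
-- ported as Nat, exact.
-- inner bit loop: for i in range(length): bits.append(1 if code & (1 << (length-i-1)) != 0 else 0)
def pvBitsA (code : Nat) (length : Nat) : List Int :=
  (List.range length).map (fun i => if code &&& (1 <<< (length - i - 1)) ≠ 0 then (1 : Int) else 0)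

-- inner symbol loop: returns the early-returned bits (if any) and the running code
def pvRowA (row : List Int) (symbol : Int) (length : Nat) (code : Nat) : Option (List Int) × Nat :=
  match row with
  | [] => (none, code)
  | s :: rest =>
    if s = symbol then (some (pvBitsA code length), code)
    else pvRowA rest symbol length (code + 1)

-- outer loop over enumerate(table)
def pvLoopA (table : List (List Int)) (symbol : Int) (i : Nat) (code : Nat) : Option (List Int) :=
  match table with
  | [] => none
  | row :: rest =>
    match pvRowA row symbol (i + 1) code with
    | (some bits, _) => some bits
    | (none, code') => pvLoopA rest symbol (i + 1) (code' <<< 1)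

def get_huffman_code (table : List (List Int)) (symbol : Int) : List Int :=
  (pvLoopA table symbol 0 0).getD []   -- none = the 'Missing symbol' raise, excluded by Pre_

-- ===== PORT B =====
-- first loop of Source B: first row containing the symbol → (L, j); j is guarded by 'symbol in row',
-- so row.index(symbol) never raises (.getD 0 is unreachable)
def pvFindB (table : List (List Int)) (symbol : Int) (i : Nat) : Option (Nat × Nat) :=
  match table with
  | [] => none
  | row :: rest =>
    if row.contains symbol then some (i + 1, (PySem.List.index? row symbol).getD 0)
    else pvFindB rest symbol (i + 1)

-- third loop of Source B: L times append (code & 1), code >>= 1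
def pvBitsB (code : Nat) (n : Nat) (bits : List Int) : List Int :=
  match n with
  | 0 => bits
  | m + 1 => pvBitsB (code >>> 1) m (bits ++ [((code &&& 1 : Nat) : Int)])

def get_huffman_code_alt (table : List (List Int)) (symbol : Int) : List Int :=
  match pvFindB table symbol 0 with
  | none => []   -- the 'Missing symbol' raise, excluded by Pre_
  | some (L, j) =>
    -- table[:L-1] with L ≥ 1, so the slice is List.take (L-1), exact
    let first := (table.take (L - 1)).foldl (fun acc row => (acc + row.length) <<< 1) 0
    (pvBitsB (first + j) L []).reverse   -- bits[::-1]

-- ===== PRECONDITION & SPEC =====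
-- Pre_ excludes exactly the inputs where A raises Exception("Missing symbol") (B raises there too).
def Pre_get_huffman_code (table : List (List Int)) (symbol : Int) : Prop :=
  ∃ row ∈ table, symbol ∈ row
instance (table : List (List Int)) (symbol : Int) : Decidable (Pre_get_huffman_code table symbol) := by unfold Pre_get_huffman_code; infer_instance

def pvWitness_get_huffman_code : List (List Int) × Int := ([[5], [2, 7]], 7)

def Spec_get_huffman_code (table : List (List Int)) (symbol : Int) (out : List Int) : Prop := out = get_huffman_code_alt table symbol
instance (table : List (List Int)) (symbol : Int) (out : List Int) : Decidable (Spec_get_huffman_code table symbol out) := by unfold Spec_get_huffman_code; infer_instance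

-- ===== CLAIM (what is proved, stated in full; the proofs are below) =====
def Claim_equal_get_huffman_code : Prop := ∀ (table : List (List Int)) (symbol : Int), Dom_get_huffman_code table symbol → Pre_get_huffman_code table symbol → Spec_get_huffman_code table symbol (get_huffman_code table symbol)

-- ===== LEMMAS AND PROOFS =====

-- little-endian bit list, and the first-code fold, as proof-side views of B's loops
def pvLeb (code : Nat) : Nat → List Int
  | 0 => []
  | m + 1 => ((code &&& 1 : Nat) : Int) :: pvLeb (code >>> 1) m

def pvFfold (c : Nat) (rows : List (List Int)) : Nat :=
  rows.foldl (fun acc row => (acc + row.length) <<< 1) c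

theorem pvBitsB_eq (n : Nat) : ∀ (code : Nat) (acc : List Int),
    pvBitsB code n acc = acc ++ pvLeb code n := by
  induction n with
  | zero => intro code acc; simp [pvBitsB, pvLeb]
  | succ m ih => intro code acc; simp [pvBitsB, pvLeb, ih]

theorem pvBit_shift (c k : Nat) :
    (c &&& (1 <<< (k + 1)) ≠ 0) ↔ ((c >>> 1) &&& (1 <<< k) ≠ 0) := by
  have h1 : (1 : Nat) <<< (k + 1) = 2 ^ (k + 1) := by simp [Nat.shiftLeft_eq]
  have h2 : (1 : Nat) <<< k = 2 ^ k := by simp [Nat.shiftLeft_eq]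
  rw [h1, h2, Nat.and_two_pow, Nat.and_two_pow]
  have h3 : c >>> 1 = c / 2 := by
    simp [Nat.shiftRight_eq_div_pow]
  rw [h3, ← Nat.testBit_add_one]
  cases c.testBit (k + 1) <;> simp

theorem pvLeb_reverse (n : Nat) : ∀ code : Nat,
    (pvLeb code n).reverse = pvBitsA code n := by
  induction n with
  | zero => intro code; simp [pvLeb, pvBitsA]
  | succ m ih =>
    intro code
    have hlast : ((code &&& 1 : Nat) : Int)
        = (if code &&& (1 <<< (m + 1 - m - 1)) ≠ 0 then (1 : Int) else 0) := by
      have h0 : m + 1 - m - 1 = 0 := by omega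
      have h1 : code &&& 1 = code % 2 := Nat.and_one_is_mod code
      rw [h0, Nat.shiftLeft_zero, h1]
      rcases Nat.mod_two_eq_zero_or_one code with h | h <;> simp [h]
    have hmap : (List.range m).map
          (fun i => if code &&& (1 <<< (m + 1 - i - 1)) ≠ 0 then (1 : Int) else 0)
        = (List.range m).map
          (fun i => if (code >>> 1) &&& (1 <<< (m - i - 1)) ≠ 0 then (1 : Int) else 0) := by
      apply List.map_congr_left
      intro i hi
      have hi' : i < m := List.mem_range.mp hi
      have he : m + 1 - i - 1 = (m - i - 1) + 1 := by omega
      rw [he]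
      simp only [pvBit_shift]
    calc (pvLeb code (m + 1)).reverse
        = (pvLeb (code >>> 1) m).reverse ++ [((code &&& 1 : Nat) : Int)] := by
          simp [pvLeb]
      _ = pvBitsA (code >>> 1) m ++ [((code &&& 1 : Nat) : Int)] := by rw [ih]
      _ = pvBitsA code (m + 1) := by
          rw [pvBitsA, pvBitsA, List.range_succ, List.map_append, hmap, hlast]
          rcases Nat.mod_two_eq_zero_or_one code with h | h <;>
            simp [Nat.and_one_is_mod, h]

theorem pvRowA_none (symbol : Int) (length : Nat) :
    ∀ (row : List Int) (code : Nat), symbol ∉ row →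
      pvRowA row symbol length code = (none, code + row.length) := by
  intro row
  induction row with
  | nil => intro code _; simp [pvRowA]
  | cons s rest ih =>
    intro code hmem
    have hs : ¬ s = symbol := by intro h; exact hmem (by simp [h])
    have hrest : symbol ∉ rest := fun h => hmem (List.mem_cons_of_mem _ h)
    simp only [pvRowA, if_neg hs, ih (code + 1) hrest, List.length_cons, Prod.mk.injEq]
    exact ⟨trivial, by omega⟩

theorem pvRowA_some (symbol : Int) (length : Nat) :
    ∀ (row : List Int) (j code : Nat), PySem.List.index? row symbol = some j →
      (pvRowA row symbol length code).1 = some (pvBitsA (code + j) length) := by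
  intro row
  induction row with
  | nil => intro j code h; simp [PySem.List.index?_eq_idxOf?, List.idxOf?] at h
  | cons s rest ih =>
    intro j code h
    by_cases hs : s = symbol
    · subst hs
      rw [PySem.List.index?_cons_self] at h
      cases h
      simp [pvRowA]
    · have hne : s ≠ symbol := hs
      rw [PySem.List.index?_cons_of_ne rest hne] at h
      rcases Option.map_eq_some_iff.mp h with ⟨j', hj', rfl⟩
      have := ih j' (code + 1) hj'
      simp only [pvRowA, if_neg hs, this]
      congr 2
      omega

theorem pvFindB_ge (symbol : Int) :
    ∀ (table : List (List Int)) (i L j : Nat),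
      pvFindB table symbol i = some (L, j) → i + 1 ≤ L := by
  intro table
  induction table with
  | nil => intro i L j h; simp [pvFindB] at h
  | cons row rest ih =>
    intro i L j h
    by_cases hc : row.contains symbol
    · simp only [pvFindB, if_pos hc, Option.some.injEq, Prod.mk.injEq] at h
      omega
    · simp only [pvFindB, if_neg hc] at h
      have := ih (i + 1) L j h
      omega

theorem pvLoopA_eq_find (symbol : Int) :
    ∀ (table : List (List Int)) (i c : Nat),
      pvLoopA table symbol i c =
        Option.map (fun Lj => pvBitsA (pvFfold c (table.take (Lj.1 - i - 1)) + Lj.2) Lj.1)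
          (pvFindB table symbol i) := by
  intro table
  induction table with
  | nil => intro i c; simp [pvLoopA, pvFindB]
  | cons row rest ih =>
    intro i c
    by_cases hc : row.contains symbol
    · have hmem : symbol ∈ row := by simpa using hc
      obtain ⟨j, hj⟩ := Option.isSome_iff_exists.mp
        ((PySem.List.index?_isSome_iff row symbol).mpr hmem)
      have h1 := pvRowA_some symbol (i + 1) row j c hj
      simp only [pvFindB, if_pos hc, hj, Option.map_some, Option.getD_some]
      rw [pvLoopA]
      rcases h2 : pvRowA row symbol (i + 1) c with ⟨ob, c'⟩
      rw [h2] at h1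
      simp only at h1
      subst h1
      simp [pvFfold]
    · have hmem : symbol ∉ row := by simpa using hc
      have h1 := pvRowA_none symbol (i + 1) row c hmem
      rw [pvLoopA, h1]
      simp only [pvFindB, if_neg hc]
      rw [ih (i + 1) ((c + row.length) <<< 1)]
      rcases hf : pvFindB rest symbol (i + 1) with _ | ⟨L, j⟩
      · simp
      · have hge := pvFindB_ge symbol rest (i + 1) L j hf
        simp only [Option.map_some]
        congr 1
        have htake : (row :: rest).take (L - i - 1) = row :: rest.take (L - i - 2) := by
          have : L - i - 1 = (L - i - 2) + 1 := by omega
          rw [this, List.take_succ_cons]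
        rw [htake]
        have : L - (i + 1) - 1 = L - i - 2 := by omega
        rw [this]
        simp [pvFfold]

theorem pvFindB_isSome (symbol : Int) :
    ∀ (table : List (List Int)) (i : Nat), (∃ row ∈ table, symbol ∈ row) →
      (pvFindB table symbol i).isSome := by
  intro table
  induction table with
  | nil => intro i h; rcases h with ⟨row, hr, _⟩; simp at hr
  | cons row rest ih =>
    intro i h
    by_cases hc : row.contains symbol
    · rw [pvFindB, if_pos hc]; simp
    · have hmem : symbol ∉ row := by simpa using hc
      rcases h with ⟨r, hr, hs⟩
      rcases List.mem_cons.mp hr with rfl | hr'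
      · exact absurd hs hmem
      · simp only [pvFindB, if_neg hc]
        exact ih (i + 1) ⟨r, hr', hs⟩

-- ===== VERDICT (by name: the statement is the Claim_ definition above) =====
theorem get_huffman_code_spec : Claim_equal_get_huffman_code := by
  intro table symbol _ hpre
  unfold Spec_get_huffman_code get_huffman_code get_huffman_code_alt
  have hsome := pvFindB_isSome symbol table 0 hpre
  rcases hf : pvFindB table symbol 0 with _ | ⟨L, j⟩
  · rw [hf] at hsome; simp at hsome
  · rw [pvLoopA_eq_find symbol table 0 0, hf]
    simp only [Option.map_some, Option.getD_some]
    rw [pvBitsB_eq, List.nil_append, pvLeb_reverse]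
    rfl
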